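-- pv_equiv track=rewrite | github.com/singhxgaurav-code/viral-fashion-agent | src/uploaders/__init__.py | get_total_reach
-- ===== SOURCE A (Python) =====
-- from typing import Dict, List, Optional
--
-- def get_total_reach(analytics: Dict) -> Dict:
--     """Calculate total reach across all platforms"""
--     total = {
--         'total_views': 0,
--         'total_likes': 0,
--         'total_comments': 0,
--         'total_shares': 0
--     }
--
--     for platform, stats in analytics.items():
--         total['total_views'] += stats.get('views', 0)
--         total['total_likes'] += stats.get('likes', 0)
--         total['total_comments'] += stats.get('comments', 0)
--         total['total_shares'] += stats.get('retweets', 0) + stats.get('shares', 0)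
--
--     return total
-- ===== SOURCE B (Python) =====
-- def get_total_reach(analytics):
--     """Calculate total reach across all platforms"""
--     # Key-agnostic group-by: merge every platform's stats into one tally keyed
--     # by stat name, then project the four fields from the merged tally.
--     tally = {}
--     for stats in analytics.values():
--         for key, value in stats.items():
--             tally[key] = tally.get(key, 0) + value
--     return {
--         'total_views': tally.get('views', 0),
--         'total_likes': tally.get('likes', 0),
--         'total_comments': tally.get('comments', 0),
--         'total_shares': tally.get('retweets', 0) + tally.get('shares', 0),
--     }
-- ===== Notes on version B (the rewrite author's own statement) =====
-- stated objective: alternative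
-- what changed: Instead of accumulating the four named totals per platform, B merges all per-platform stats into one key-agnostic tally dict (group-by stat name) in a flat pass over every (key,value) pair, and only at the end projects views/likes/comments and retweets+shares from the merged tally.
import Mathlib
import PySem

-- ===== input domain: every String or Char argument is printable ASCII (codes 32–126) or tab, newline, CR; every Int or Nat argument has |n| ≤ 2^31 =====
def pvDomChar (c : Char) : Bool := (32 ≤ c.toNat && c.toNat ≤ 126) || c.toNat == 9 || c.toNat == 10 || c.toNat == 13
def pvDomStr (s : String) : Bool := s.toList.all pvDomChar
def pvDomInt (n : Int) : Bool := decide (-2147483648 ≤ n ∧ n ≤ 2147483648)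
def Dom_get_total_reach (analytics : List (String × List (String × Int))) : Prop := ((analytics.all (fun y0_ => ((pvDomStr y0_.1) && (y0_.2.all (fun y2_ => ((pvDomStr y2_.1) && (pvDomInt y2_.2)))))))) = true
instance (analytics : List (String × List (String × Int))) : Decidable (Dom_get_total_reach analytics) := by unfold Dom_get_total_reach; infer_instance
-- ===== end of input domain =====

-- B merges all per-platform stats into one key-agnostic tally dict (group-by stat name) and projects the four fields at the end, instead of A's per-platform accumulation of four named totals; same cost, different algorithm.


-- shared helper: stats.get(k, 0) on an association-list dict (first match)
def pvGet (stats : List (String × Int)) (k : String) : Int :=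
  (PySem.Dict.mk stats).getD k 0

-- ===== PORT A =====
-- one pass: a 4-key dict accumulator updated in place for each platform's stats (pvStep is the loop body)
def pvStep (t : PySem.Dict String Int) (p : String × List (String × Int)) : PySem.Dict String Int :=
  let t := t.insert "total_views" (t.getD "total_views" 0 + pvGet p.2 "views")
  let t := t.insert "total_likes" (t.getD "total_likes" 0 + pvGet p.2 "likes")
  let t := t.insert "total_comments" (t.getD "total_comments" 0 + pvGet p.2 "comments")
  t.insert "total_shares" (t.getD "total_shares" 0 + (pvGet p.2 "retweets" + pvGet p.2 "shares"))

def get_total_reach (analytics : List (String × List (String × Int))) : List (String × Int) :=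
  let total : PySem.Dict String Int :=
    PySem.Dict.mk [("total_views", 0), ("total_likes", 0), ("total_comments", 0), ("total_shares", 0)]
  let total := analytics.foldl pvStep total
  total.items

-- ===== PORT B =====
-- inner loop body: tally[key] = tally.get(key, 0) + value
def pvTallyAdd (t : PySem.Dict String Int) (kv : String × Int) : PySem.Dict String Int :=
  t.insert kv.1 (t.getD kv.1 0 + kv.2)

def get_total_reach_alt (analytics : List (String × List (String × Int))) : List (String × Int) :=
  let tally : PySem.Dict String Int :=
    analytics.foldl (fun t p => p.2.foldl pvTallyAdd t) PySem.Dict.empty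
  [("total_views", tally.getD "views" 0),
   ("total_likes", tally.getD "likes" 0),
   ("total_comments", tally.getD "comments" 0),
   ("total_shares", tally.getD "retweets" 0 + tally.getD "shares" 0)]

-- ===== PRECONDITION & SPEC =====
-- Pre_ requires each platform's stats association list to have pairwise-distinct keys — exactly what a
-- Python inner dict guarantees; a list with a duplicated key represents no Python dict (A's domain is
-- dicts of dicts), so Pre_ excludes no input the Python A accepts.
def Pre_get_total_reach (analytics : List (String × List (String × Int))) : Prop :=
  ∀ p ∈ analytics, (p.2.map Prod.fst).Nodup
instance (analytics : List (String × List (String × Int))) : Decidable (Pre_get_total_reach analytics) := by unfold Pre_get_total_reach; infer_instance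
def pvWitness_get_total_reach : (List (String × List (String × Int))) :=
  [("tiktok", [("views", 10), ("likes", 2), ("shares", 1)]), ("x", [("views", 5), ("retweets", 3)])]
def Spec_get_total_reach (analytics : List (String × List (String × Int))) (out : List (String × Int)) : Prop := out = get_total_reach_alt analytics
instance (analytics : List (String × List (String × Int))) (out : List (String × Int)) : Decidable (Spec_get_total_reach analytics out) := by unfold Spec_get_total_reach; infer_instance

-- ===== CLAIM (what is proved, stated in full; the proofs are below) =====
def Claim_equal_get_total_reach : Prop := ∀ (analytics : List (String × List (String × Int))), Dom_get_total_reach analytics → Pre_get_total_reach analytics → Spec_get_total_reach analytics (get_total_reach analytics)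

-- ===== LEMMAS AND PROOFS =====

-- field-wise sum of one stats list at key q
def pvKeySum (stats : List (String × Int)) (q : String) : Int :=
  ((stats.filter (fun kv => kv.1 = q)).map Prod.snd).sum

-- B's inner loop adds, at every key q, the sum of the values stored under q
lemma tallyAdd_foldl_getD (l : List (String × Int)) (t : PySem.Dict String Int) (q : String) :
    (l.foldl pvTallyAdd t).getD q 0 = t.getD q 0 + pvKeySum l q := by
  induction l generalizing t with
  | nil => simp [pvKeySum]
  | cons kv l ih =>
    rw [List.foldl_cons, ih]
    unfold pvTallyAdd pvKeySum
    rw [PySem.Dict.getD_insert, List.filter_cons]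
    by_cases h : kv.1 = q
    · simp [h]; ring
    · simp [h]; intro hq; exact absurd hq.symm h

-- B's whole tally at key q is the sum over platforms of that platform's values under q
lemma tally_getD (xs : List (String × List (String × Int))) (t : PySem.Dict String Int) (q : String) :
    (xs.foldl (fun t p => p.2.foldl pvTallyAdd t) t).getD q 0
      = t.getD q 0 + (xs.map (fun p => pvKeySum p.2 q)).sum := by
  induction xs generalizing t with
  | nil => simp
  | cons x xs ih =>
    rw [List.foldl_cons, ih, tallyAdd_foldl_getD]
    simp [add_assoc]

-- under Nodup keys, the field-wise value sum at q is exactly stats.get(q, 0)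
lemma keySum_eq_pvGet (stats : List (String × Int)) (q : String)
    (h : (stats.map Prod.fst).Nodup) : pvKeySum stats q = pvGet stats q := by
  induction stats with
  | nil => simp [pvKeySum, pvGet, PySem.Dict.getD, PySem.Dict.get?]
  | cons kv l ih =>
    simp only [List.map_cons, List.nodup_cons] at h
    by_cases hk : kv.1 = q
    · have hfil : l.filter (fun kv => kv.1 = q) = [] := by
        apply List.filter_eq_nil_iff.mpr
        intro p hp hq
        exact h.1 (hk ▸ (by simpa using hq) ▸ List.mem_map_of_mem hp)
      simp [pvKeySum, pvGet, PySem.Dict.getD, PySem.Dict.get?, hfil, hk]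
    · have := ih h.2
      simp only [pvKeySum, pvGet, PySem.Dict.getD, PySem.Dict.get?, List.filter_cons] at this ⊢
      simpa [hk] using this

-- one loop step on A's 4-key accumulator dict, evaluated
lemma pvStep_mk (a b c d : Int) (p : String × List (String × Int)) :
    pvStep (PySem.Dict.mk [("total_views", a), ("total_likes", b), ("total_comments", c), ("total_shares", d)]) p
    = PySem.Dict.mk [("total_views", a + pvGet p.2 "views"), ("total_likes", b + pvGet p.2 "likes"),
        ("total_comments", c + pvGet p.2 "comments"), ("total_shares", d + (pvGet p.2 "retweets" + pvGet p.2 "shares"))] := rfl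

-- A's loop, started from arbitrary accumulator values, adds the four field-wise sums
lemma get_total_reach_loop (xs : List (String × List (String × Int))) (a b c d : Int) :
    xs.foldl pvStep
      (PySem.Dict.mk [("total_views", a), ("total_likes", b), ("total_comments", c), ("total_shares", d)])
    = PySem.Dict.mk [("total_views", a + (xs.map (fun p => pvGet p.2 "views")).sum),
        ("total_likes", b + (xs.map (fun p => pvGet p.2 "likes")).sum),
        ("total_comments", c + (xs.map (fun p => pvGet p.2 "comments")).sum),
        ("total_shares", d + (xs.map (fun p => pvGet p.2 "retweets" + pvGet p.2 "shares")).sum)] := by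
  induction xs generalizing a b c d with
  | nil => simp
  | cons x xs ih =>
    rw [List.foldl_cons, pvStep_mk, ih]
    simp [add_assoc]

-- ===== VERDICT (by name: the statement is the Claim_ definition above) =====
theorem get_total_reach_spec : Claim_equal_get_total_reach := by
  intro analytics _ hpre
  unfold Spec_get_total_reach get_total_reach get_total_reach_alt
  simp only []
  rw [get_total_reach_loop]
  rw [tally_getD, tally_getD, tally_getD, tally_getD, tally_getD]
  have hsum : ∀ q : String, (analytics.map (fun p => pvKeySum p.2 q)).sum
      = (analytics.map (fun p => pvGet p.2 q)).sum := by
    intro q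
    apply congrArg List.sum
    apply List.map_congr_left
    intro p hp
    exact keySum_eq_pvGet p.2 q (hpre p hp)
  have hsplit : (analytics.map (fun p => pvGet p.2 "retweets" + pvGet p.2 "shares")).sum
      = (analytics.map (fun p => pvGet p.2 "retweets")).sum + (analytics.map (fun p => pvGet p.2 "shares")).sum := by
    exact PySem.List.sum_map_add_int analytics (fun p => pvGet p.2 "retweets") (fun p => pvGet p.2 "shares")
  simp [hsum, hsplit]
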